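-- pv_equiv track=rewrite | github.com/ucd-plse/mpi-error-prop | scripts/injection/analyze.py | impacted_tests
-- ===== SOURCE A (Python) =====
-- def covered_tests(full_test_results, report_id):
--     """Returns sets of test names that are covered for the report id
--
--     full_test_results: test_name -> test result
--     (dropping, origin)
--     """
--
--     dropping = set()
--     origin = set()
--
--     coverage_none_results = full_test_results[report_id]["coverage-coverage"]
--
--     if not coverage_none_results:
--         return (dropping, origin)
--
--     for test_name, behavior in coverage_none_results.items():
--         if "dropping site" in behavior:
--             dropping.add(test_name)
--         if "origin site" in behavior:
--             origin.add(test_name)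
--
--     return (dropping, origin)
--
-- def impacted_tests(run, full_test_results, report_id):
--     # Find the number of covered tests, both ends covered for now
--     drop_covered, origin_covered = covered_tests(full_test_results, report_id)
--
--     test_names = set()
--
--     # For each test that is covered but does not detect the error,
--     return_none_results = full_test_results[report_id][run]
--     if not return_none_results:
--         return test_names
--
--     for test_name, behavior in return_none_results.items():
--         if test_name in origin_covered:
--             test_names.add(test_name)
--
--     return test_names
-- ===== SOURCE B (Python) =====
-- def impacted_tests(run, full_test_results, report_id):
--     # Single filtering pass over the run's results with direct coverage lookups;
--     # no pre-pass building dropping/origin sets.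
--     report = full_test_results[report_id]
--     cov = report["coverage-coverage"]
--     run_results = report[run]
--     if not run_results:
--         return set()
--     return {t for t in run_results if "origin site" in cov.get(t, "")}
-- ===== Notes on version B (the rewrite author's own statement) =====
-- stated objective: simpler
-- what changed: B drops the covered_tests pre-pass that scans the whole coverage dict building two sets (the dropping set is computed and thrown away); it filters the run's results in one pass with a direct cov.get lookup per test name.
import Mathlib
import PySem

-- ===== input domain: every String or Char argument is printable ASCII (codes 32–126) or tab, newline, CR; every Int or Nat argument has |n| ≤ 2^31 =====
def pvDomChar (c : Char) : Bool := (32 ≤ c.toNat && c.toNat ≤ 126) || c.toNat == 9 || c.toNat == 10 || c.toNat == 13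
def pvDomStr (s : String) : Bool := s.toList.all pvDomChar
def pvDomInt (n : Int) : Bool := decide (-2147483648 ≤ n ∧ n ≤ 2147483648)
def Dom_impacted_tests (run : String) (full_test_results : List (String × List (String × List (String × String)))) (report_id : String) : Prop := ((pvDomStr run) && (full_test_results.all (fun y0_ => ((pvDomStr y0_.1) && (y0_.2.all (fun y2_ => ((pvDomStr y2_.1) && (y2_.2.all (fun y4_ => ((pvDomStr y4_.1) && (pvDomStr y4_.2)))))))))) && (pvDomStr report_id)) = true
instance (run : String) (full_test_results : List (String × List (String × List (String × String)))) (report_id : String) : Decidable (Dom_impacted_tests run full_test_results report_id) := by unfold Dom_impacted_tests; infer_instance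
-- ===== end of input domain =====

-- B eliminates A's covered_tests pre-pass over the coverage dict (which builds the unused
-- dropping set and the origin set) and instead filters the run's results in a single pass,
-- looking each test name up directly in the coverage dict ("simpler"); return value only,
-- neither version mutates its arguments.

-- full_test_results is a Python dict of dicts of dicts: build the nested PySem.Dict once
-- (shared by both ports and Pre_; it is the dict the Python functions receive).
def pvDictOf (full_test_results : List (String × List (String × List (String × String)))) :
    PySem.Dict String (PySem.Dict String (PySem.Dict String String)) :=
  PySem.Dict.ofList (full_test_results.map (fun p =>
    (p.1, PySem.Dict.ofList (p.2.map (fun q => (q.1, PySem.Dict.ofList q.2))))))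

-- ===== PORT A =====
-- helper covered_tests, as in A; a failed dict lookup (Python KeyError) returns ([], [])
-- here and is excluded by Pre_impacted_tests.
def covered_tests (full_test_results : List (String × List (String × List (String × String)))) (report_id : String) : PySem.Set String × PySem.Set String :=
  match (pvDictOf full_test_results).get? report_id with
  | none => ([], [])
  | some rep =>
    match rep.get? "coverage-coverage" with
    | none => ([], [])
    | some cov =>
      if cov.items.isEmpty then ([], [])
      else cov.items.foldl (fun st tb =>
        let st1 := if PySem.Str.isIn "dropping site" tb.2 then (PySem.Set.add st.1 tb.1, st.2) else st
        if PySem.Str.isIn "origin site" tb.2 then (st1.1, PySem.Set.add st1.2 tb.1) else st1)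
        (([], []) : PySem.Set String × PySem.Set String)

def impacted_tests (run : String) (full_test_results : List (String × List (String × List (String × String)))) (report_id : String) : List String :=
  let oc := covered_tests full_test_results report_id
  let origin_covered := oc.2
  match (pvDictOf full_test_results).get? report_id with
  | none => []
  | some rep =>
    match rep.get? run with
    | none => []
    | some runRes =>
      if runRes.items.isEmpty then ([] : PySem.Set String)
      else runRes.items.foldl
        (fun acc tb => if PySem.Set.contains origin_covered tb.1 then PySem.Set.add acc tb.1 else acc)
        ([] : PySem.Set String)

-- ===== PORT B =====
def impacted_tests_alt (run : String) (full_test_results : List (String × List (String × List (String × String)))) (report_id : String) : List String :=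
  match (pvDictOf full_test_results).get? report_id with
  | none => []
  | some rep =>
    match rep.get? "coverage-coverage" with
    | none => []
    | some cov =>
      match rep.get? run with
      | none => []
      | some runRes =>
        if runRes.items.isEmpty then ([] : PySem.Set String)
        else PySem.Set.ofList
          (((runRes.items.filter (fun tb => PySem.Str.isIn "origin site" (cov.getD tb.1 ""))).map (fun tb => tb.1)))

-- ===== PRECONDITION & SPEC =====
-- Pre_ excludes exactly the inputs where the Python A raises KeyError: report_id must be a
-- key of full_test_results and its entry must have both the "coverage-coverage" key and the run key.
def Pre_impacted_tests (run : String) (full_test_results : List (String × List (String × List (String × String)))) (report_id : String) : Prop :=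
  ((pvDictOf full_test_results).get? report_id).any
    (fun rep => rep.contains "coverage-coverage" && rep.contains run) = true
instance (run : String) (full_test_results : List (String × List (String × List (String × String)))) (report_id : String) : Decidable (Pre_impacted_tests run full_test_results report_id) := by unfold Pre_impacted_tests; infer_instance

def pvWitness_impacted_tests : String × (List (String × List (String × List (String × String)))) × String :=
  ("run1", [("r1", [("coverage-coverage", [("t1", "origin site hit"), ("t2", "dropping site")]), ("run1", [("t1", "x"), ("t3", "y")])])], "r1")

def Spec_impacted_tests (run : String) (full_test_results : List (String × List (String × List (String × String)))) (report_id : String) (out : List String) : Prop := out = impacted_tests_alt run full_test_results report_id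
instance (run : String) (full_test_results : List (String × List (String × List (String × String)))) (report_id : String) (out : List String) : Decidable (Spec_impacted_tests run full_test_results report_id out) := by unfold Spec_impacted_tests; infer_instance

-- ===== CLAIM (what is proved, stated in full; the proofs are below) =====
def Claim_equal_impacted_tests : Prop := ∀ (run : String) (full_test_results : List (String × List (String × List (String × String)))) (report_id : String), Dom_impacted_tests run full_test_results report_id → Pre_impacted_tests run full_test_results report_id → Spec_impacted_tests run full_test_results report_id (impacted_tests run full_test_results report_id)

-- ===== LEMMAS AND PROOFS =====

-- the second component of A's covered_tests pair-fold is the plain origin fold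
theorem pv_snd_pair_fold (xs : List (String × String)) (st : PySem.Set String × PySem.Set String) :
    (xs.foldl (fun st tb =>
        let st1 := if PySem.Str.isIn "dropping site" tb.2 then (PySem.Set.add st.1 tb.1, st.2) else st
        if PySem.Str.isIn "origin site" tb.2 then (st1.1, PySem.Set.add st1.2 tb.1) else st1) st).2
    = xs.foldl (fun s tb => if PySem.Str.isIn "origin site" tb.2 then s.add tb.1 else s) st.2 := by
  induction xs generalizing st with
  | nil => rfl
  | cons hd tl ih =>
    simp only [List.foldl]
    rw [ih]
    congr 1
    split_ifs <;> rfl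

-- an add-if fold over pairs is Set.ofList of the filtered first components
theorem pv_foldl_addif_eq_ofList (p : String × String → Bool) (xs : List (String × String)) :
    xs.foldl (fun s tb => if p tb then PySem.Set.add s tb.1 else s) ([] : PySem.Set String)
      = PySem.Set.ofList ((xs.filter p).map (fun tb => tb.1)) := by
  rw [PySem.Set.ofList_eq_foldl]
  have h : ∀ (init : PySem.Set String),
      xs.foldl (fun s tb => if p tb then PySem.Set.add s tb.1 else s) init
        = ((xs.filter p).map (fun tb => tb.1)).foldl PySem.Set.add init := by
    induction xs with
    | nil => intro init; rfl
    | cons hd tl ih =>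
      intro init
      by_cases hp : p hd = true <;> simp [List.foldl, List.filter, hp, ih]
  exact h []

-- the origin-set membership test equals B's direct coverage lookup
theorem pv_origin_mem_iff (cov : PySem.Dict String String) (hnd : cov.keys.Nodup) (t : String) :
    (t ∈ (cov.items.foldl
        (fun s tb => if PySem.Str.isIn "origin site" tb.2 then PySem.Set.add s tb.1 else s)
        ([] : PySem.Set String))) ↔ PySem.Str.isIn "origin site" (cov.getD t "") = true := by
  rw [pv_foldl_addif_eq_ofList]
  rw [PySem.Set.mem_ofList]
  simp only [List.mem_map, List.mem_filter]
  constructor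
  · rintro ⟨tb, ⟨htb, hptb⟩, rfl⟩
    have : cov.get? tb.1 = some tb.2 :=
      (PySem.Dict.get?_eq_some_iff_mem_items cov tb.1 tb.2 hnd).2 htb
    rw [PySem.Dict.getD_eq_get?_getD, this]
    exact hptb
  · intro h
    cases hg : cov.get? t with
    | none =>
      rw [PySem.Dict.getD_eq_get?_getD, hg] at h
      exact absurd h (by decide)
    | some b =>
      rw [PySem.Dict.getD_eq_get?_getD, hg] at h
      exact ⟨(t, b), ⟨(PySem.Dict.get?_eq_some_iff_mem_items cov t b hnd).1 hg, h⟩, rfl⟩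

-- every item of a Dict built by a foldl of inserts comes from the seed dict or the list
theorem pv_mem_items_foldl_insert {kappa nu : Type} [BEq kappa] [LawfulBEq kappa]
    (ps : List (kappa × nu)) (d : PySem.Dict kappa nu) (p : kappa × nu)
    (h : p ∈ (ps.foldl (fun acc q => acc.insert q.1 q.2) d).items) : p ∈ d.items ∨ p ∈ ps := by
  induction ps generalizing d with
  | nil => exact Or.inl h
  | cons hd tl ih =>
    rcases ih (d.insert hd.1 hd.2) h with h' | h'
    · rcases (PySem.Dict.mem_items_insert d hd.1 hd.2 p).1 h' with h'' | h''
      · exact Or.inr (by simp [h''])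
      · exact Or.inl h''.1
    · exact Or.inr (List.mem_cons_of_mem _ h')

-- every item of Dict.ofList ps is an element of ps
theorem pv_mem_items_ofList {kappa nu : Type} [BEq kappa] [LawfulBEq kappa]
    (ps : List (kappa × nu)) (p : kappa × nu)
    (h : p ∈ (PySem.Dict.ofList ps).items) : p ∈ ps := by
  have := pv_mem_items_foldl_insert ps PySem.Dict.empty p h
  simpa [PySem.Dict.empty] using this

theorem impacted_tests_spec : Claim_equal_impacted_tests := by
  intro run ftr rid _ hpre
  unfold Pre_impacted_tests at hpre
  unfold Spec_impacted_tests
  cases hrep : (pvDictOf ftr).get? rid with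
  | none => rw [hrep] at hpre; simp at hpre
  | some rep =>
    rw [hrep] at hpre
    simp only [Option.any_some, Bool.and_eq_true] at hpre
    obtain ⟨hcc, hrun⟩ := hpre
    rw [PySem.Dict.contains_eq_isSome_get?] at hcc hrun
    obtain ⟨cov, hcov⟩ := Option.isSome_iff_exists.mp hcc
    obtain ⟨runRes, hrunres⟩ := Option.isSome_iff_exists.mp hrun
    -- cov has nodup keys: it is a Dict.ofList of a raw list
    have hcovnd : cov.keys.Nodup := by
      have h1 : (rid, rep) ∈ (pvDictOf ftr).items :=
        PySem.Dict.mem_items_of_get?_eq_some _ hrep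
      have h2 := pv_mem_items_ofList _ _ h1
      rw [List.mem_map] at h2
      obtain ⟨pr, _, hpr⟩ := h2
      have hrepeq : rep = PySem.Dict.ofList (pr.2.map (fun q => (q.1, PySem.Dict.ofList q.2))) := by
        have := congrArg Prod.snd hpr; simpa using this.symm
      have h3 : ("coverage-coverage", cov) ∈ rep.items :=
        PySem.Dict.mem_items_of_get?_eq_some _ hcov
      rw [hrepeq] at h3
      have h4 := pv_mem_items_ofList _ _ h3
      rw [List.mem_map] at h4
      obtain ⟨qr, _, hqr⟩ := h4
      have hcoveq : cov = PySem.Dict.ofList qr.2 := by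
        have := congrArg Prod.snd hqr; simpa using this.symm
      rw [hcoveq]
      exact PySem.Dict.nodup_keys_ofList _
    -- origin set of covered_tests = the plain origin fold over cov.items
    have horigin : (covered_tests ftr rid).2
        = cov.items.foldl
            (fun s tb => if PySem.Str.isIn "origin site" tb.2 then PySem.Set.add s tb.1 else s)
            ([] : PySem.Set String) := by
      unfold covered_tests
      simp only [hrep, hcov]
      by_cases he : cov.items.isEmpty = true
      · rw [List.isEmpty_iff] at he
        rw [he]
        rfl
      · rw [if_neg he, pv_snd_pair_fold]
    -- the two membership predicates agree pointwise
    have hpred : ∀ t : String, PySem.Set.contains (covered_tests ftr rid).2 t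
        = PySem.Str.isIn "origin site" (cov.getD t "") := by
      intro t
      rw [horigin, PySem.Set.contains_eq_decide]
      rcases h : PySem.Str.isIn "origin site" (cov.getD t "") with _ | _
      · simp only [decide_eq_false_iff_not]
        intro hmem
        rw [pv_origin_mem_iff cov hcovnd] at hmem
        rw [hmem] at h
        exact absurd h (by decide)
      · simp only [decide_eq_true_eq]
        exact (pv_origin_mem_iff cov hcovnd t).2 h
    -- now both sides reduce
    simp only [impacted_tests, impacted_tests_alt, hrep, hcov, hrunres]
    by_cases he : runRes.items.isEmpty = true
    · rw [if_pos he, if_pos he]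
    · rw [if_neg he, if_neg he]
      simp only [hpred]
      rw [pv_foldl_addif_eq_ofList]
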